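-- pv_equiv track=rewrite | github.com/pbmconsulting-hub/SmartAI-NBA | engine/edge_detection.py | detect_correlated_props
-- ===== SOURCE A (Python) =====
-- def detect_correlated_props(props_with_results):
--     """
--     Flag props from the same game as correlated bets.
--
--     When two players from the same game are included in a parlay,
--     their outcomes are statistically correlated (same pace, scoring
--     environment, and blowout risk). This should be disclosed to
--     the user so they can make informed parlay decisions.
--
--     Args:
--         props_with_results (list of dict): Analysis results. Each dict
--             must contain 'player_team' and 'opponent' keys.
--
--     Returns:
--         dict: Mapping of prop index (int) to a correlation warning
--               string, or an empty dict if no correlations found.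
--
--     Example:
--         If props[0] is LeBron (LAL vs GSW) and props[2] is Steph
--         (GSW vs LAL), both are flagged with a correlation warning.
--     """
--     # Build a "game key" for each prop: frozenset of the two teams
--     # so LAL-vs-GSW and GSW-vs-LAL map to the same key.
--     game_key_to_indices = {}  # game_key → list of prop indices
--
--     for idx, result in enumerate(props_with_results):
--         team = result.get("player_team", result.get("team", "")).upper().strip()
--         opponent = result.get("opponent", "").upper().strip()
--         if team and opponent:
--             game_key = frozenset([team, opponent])
--         elif team:
--             game_key = frozenset([team])
--         else:
--             continue  # No team info — skip
--
--         if game_key not in game_key_to_indices: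
--             game_key_to_indices[game_key] = []
--         game_key_to_indices[game_key].append(idx)
--
--     # Build the correlation warnings dict
--     correlation_warnings = {}
--
--     for game_key, indices in game_key_to_indices.items():
--         if len(indices) < 2:
--             continue  # Only one prop from this game — no correlation
--
--         teams_str = " vs ".join(sorted(game_key))
--         player_names = [props_with_results[i].get("player_name", "?") for i in indices]
--         others_str = ", ".join(
--             props_with_results[j].get("player_name", "?")
--             for j in indices
--             if j != indices[0]  # Will be customized per-prop below
--         )
--
--         for i in indices:
--             my_name = props_with_results[i].get("player_name", "?")
--             correlated_names = [
--                 props_with_results[j].get("player_name", "?")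
--                 for j in indices if j != i
--             ]
--             correlated_str = ", ".join(correlated_names)
--             correlation_warnings[i] = (
--                 f"Correlated with {correlated_str} ({teams_str} game) — "
--                 "same game props share scoring environment and blowout risk"
--             )
--
--     return correlation_warnings
-- ===== SOURCE B (Python) =====
-- def detect_correlated_props(props_with_results):
--     """Alternative implementation: no game_key->indices dict; for each first
--     occurrence of a game key (scanning props in order) collect its group by a
--     direct scan over all props."""
--     def game_key(prop):
--         team = prop.get("player_team", prop.get("team", "")).upper().strip()
--         opponent = prop.get("opponent", "").upper().strip()
--         if team and opponent:
--             return tuple(sorted({team, opponent}))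
--         if team:
--             return (team,)
--         return None
--
--     keys = [game_key(p) for p in props_with_results]
--     names = [p.get("player_name", "?") for p in props_with_results]
--     warnings = {}
--     seen = []
--     for k in keys:
--         if k is not None and k not in seen:
--             group = [j for j, kj in enumerate(keys) if kj == k]
--             if len(group) >= 2:
--                 teams = " vs ".join(k)
--                 for i in group:
--                     others = ", ".join(names[j] for j in group if j != i)
--                     warnings[i] = (
--                         f"Correlated with {others} ({teams} game) — "
--                         "same game props share scoring environment and blowout risk"
--                     )
--         seen.append(k)
--     return warnings
-- ===== Notes on version B (the rewrite author's own statement) =====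
-- stated objective: alternative
-- what changed: B drops A's game_key-to-indices dict entirely: it precomputes the key and player name of every prop once, then for each first occurrence of a game key (tracked with a seen list) collects the group by rescanning all key values directly.
import Mathlib
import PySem

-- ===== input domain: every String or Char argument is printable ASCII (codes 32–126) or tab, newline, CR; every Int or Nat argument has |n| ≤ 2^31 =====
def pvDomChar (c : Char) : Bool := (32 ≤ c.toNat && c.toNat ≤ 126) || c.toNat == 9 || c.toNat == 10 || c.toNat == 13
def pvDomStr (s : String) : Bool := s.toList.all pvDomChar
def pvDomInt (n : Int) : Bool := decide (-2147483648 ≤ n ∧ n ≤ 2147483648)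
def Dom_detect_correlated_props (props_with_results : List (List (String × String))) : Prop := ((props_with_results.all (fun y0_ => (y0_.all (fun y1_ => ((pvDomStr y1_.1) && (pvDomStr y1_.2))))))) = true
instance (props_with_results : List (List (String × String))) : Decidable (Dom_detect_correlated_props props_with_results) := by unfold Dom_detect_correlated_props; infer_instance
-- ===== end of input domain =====

-- B replaces A's game_key→indices dict grouping by a direct scan: for each first
-- occurrence of a game key it collects the group by rescanning all key values
-- (objective: alternative decomposition, not faster).

-- ===== PORT A =====
-- shared by both Pythons: the game key of one prop.  frozenset([team, opponent]) is
-- represented canonically as the SORTED list of its distinct elements (Python str '<'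
-- is Lean String '<'), so key equality = frozenset equality and the canonical list is
-- exactly sorted(game_key).
def pvGameKey (result : List (String × String)) : Option (List String) :=
  let team := PySem.Str.strip (PySem.Str.upper ((PySem.Dict.mk result).getD "player_team" ((PySem.Dict.mk result).getD "team" "")))
  let opponent := PySem.Str.strip (PySem.Str.upper ((PySem.Dict.mk result).getD "opponent" ""))
  if team ≠ "" ∧ opponent ≠ "" then
    some (if team = opponent then [team] else if team < opponent then [team, opponent] else [opponent, team])
  else if team ≠ "" then some [team]
  else none

-- the f-string both Pythons build (identical literal in Source A and Source B)
def pvMsg (correlated_str teams_str : String) : String :=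
  "Correlated with " ++ correlated_str ++ " (" ++ teams_str ++ " game) — same game props share scoring environment and blowout risk"

-- literal port of A; the unused locals player_names/others_str of A are pure and omitted;
-- indices i, j come from enumerate so the `.getD []` after pyGet? is never exercised
def detect_correlated_props (props_with_results : List (List (String × String))) : List (Int × String) :=
  let game_key_to_indices : PySem.Dict (List String) (List Int) :=
    (PySem.List.enumerate props_with_results).foldl (fun d p =>
      match pvGameKey p.2 with
      | none => d
      | some game_key => d.modify game_key [] (fun l => l ++ [p.1])) PySem.Dict.empty
  let correlation_warnings : PySem.Dict Int String :=
    game_key_to_indices.items.foldl (fun w q =>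
      if q.2.length < 2 then w
      else
        let teams_str := PySem.Str.join " vs " q.1
        q.2.foldl (fun w i =>
          let correlated_names := (q.2.filter (fun j => j ≠ i)).map (fun j =>
            (PySem.Dict.mk ((PySem.List.pyGet? props_with_results j).getD [])).getD "player_name" "?")
          w.insert i (pvMsg (PySem.Str.join ", " correlated_names) teams_str)) w) PySem.Dict.empty
  correlation_warnings.items

-- ===== PORT B =====
def pvName (p : List (String × String)) : String := (PySem.Dict.mk p).getD "player_name" "?"

-- literal port of Source B: keys/names precomputed, outer loop over keys with a `seen`
-- accumulator, groups collected by rescanning enumerate(keys)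
def detect_correlated_props_alt (props_with_results : List (List (String × String))) : List (Int × String) :=
  let keys := props_with_results.map pvGameKey
  let names := props_with_results.map pvName
  let fin := keys.foldl (fun st k0 =>
      (match k0 with
       | none => st.1
       | some k =>
         if k0 ∈ st.2 then st.1
         else
           let group := ((PySem.List.enumerate keys).filter (fun q => q.2 = some k)).map (fun q => q.1)
           if group.length ≥ 2 then
             let teams := PySem.Str.join " vs " k
             group.foldl (fun w i =>
               let others := PySem.Str.join ", " ((group.filter (fun j => j ≠ i)).map
                 (fun j => (PySem.List.pyGet? names j).getD "?"))
               w.insert i (pvMsg others teams)) st.1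
           else st.1,
       st.2 ++ [k0]))
    ((PySem.Dict.empty : PySem.Dict Int String), ([] : List (Option (List String))))
  fin.1.items

-- ===== PRECONDITION & SPEC =====
def Spec_detect_correlated_props (props_with_results : List (List (String × String))) (out : List (Int × String)) : Prop := out = detect_correlated_props_alt props_with_results
instance (props_with_results : List (List (String × String))) (out : List (Int × String)) : Decidable (Spec_detect_correlated_props props_with_results out) := by unfold Spec_detect_correlated_props; infer_instance

-- ===== CLAIM (what is proved, stated in full; the proofs are below) =====
def Claim_equal_detect_correlated_props : Prop := ∀ (props_with_results : List (List (String × String))), Dom_detect_correlated_props props_with_results → Spec_detect_correlated_props props_with_results (detect_correlated_props props_with_results)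

-- ===== LEMMAS AND PROOFS =====

-- (key, index) pairs of the props that carry a game key, in order
def pvPairs (props : List (List (String × String))) (s : Int) : List (List String × Int) :=
  (PySem.List.enumerate props s).filterMap (fun p => (pvGameKey p.2).map (fun k => (k, p.1)))

-- the keys B's loop acts on: first occurrences not already in `seen`
def pvNews (ks seen : List (Option (List String))) : List (List String) :=
  match ks with
  | [] => []
  | none :: ks => pvNews ks (seen ++ [none])
  | some k :: ks => if some k ∈ seen then pvNews ks (seen ++ [some k]) else k :: pvNews ks (seen ++ [some k])

-- the per-game-key body both programs perform, phrased with B's names list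
def pvBody (props : List (List (String × String))) (w : PySem.Dict Int String)
    (k : List String) (group : List Int) : PySem.Dict Int String :=
  if group.length < 2 then w
  else
    let teams := PySem.Str.join " vs " k
    group.foldl (fun w i =>
      let others := PySem.Str.join ", " ((group.filter (fun j => j ≠ i)).map
        (fun j => (PySem.List.pyGet? (props.map pvName) j).getD "?"))
      w.insert i (pvMsg others teams)) w

theorem pvName_lookup (props : List (List (String × String))) (j : Int) :
    (PySem.Dict.mk ((PySem.List.pyGet? props j).getD [])).getD "player_name" "?"
      = (PySem.List.pyGet? (props.map pvName) j).getD "?" := by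
  have h : PySem.List.pyGet? (props.map pvName) j = (PySem.List.pyGet? props j).map pvName := by
    simp [PySem.List.pyGet?, PySem.List.pyIdx?]
  rw [h]
  cases PySem.List.pyGet? props j <;>
    simp [pvName, PySem.Dict.getD, PySem.Dict.get?]

-- A's grouping fold = fold over the (key, index) pairs
theorem pvGmap_eq (props : List (List (String × String))) : ∀ (s : Int)
    (d : PySem.Dict (List String) (List Int)),
    (PySem.List.enumerate props s).foldl (fun d p =>
        match pvGameKey p.2 with
        | none => d
        | some game_key => d.modify game_key [] (fun l => l ++ [p.1])) d
      = (pvPairs props s).foldl (fun d q => d.modify q.1 [] (fun l => l ++ [q.2])) d := by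
  induction props with
  | nil => intro s d; rfl
  | cons r props ih =>
    intro s d
    rw [PySem.List.enumerate_cons]
    cases h : pvGameKey r <;> simp only [List.foldl_cons, pvPairs, PySem.List.enumerate_cons,
      List.filterMap_cons, h, Option.map_none, Option.map_some] <;>
      exact ih (s+1) _

theorem pvPairs_fst (props : List (List (String × String))) : ∀ (s : Int),
    (pvPairs props s).map (fun q => q.1) = (props.map pvGameKey).filterMap id := by
  induction props with
  | nil => intro s; rfl
  | cons r props ih =>
    intro s
    have hih := ih (s+1); simp only [pvPairs, id] at hih ⊢
    cases h : pvGameKey r <;>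
      simp only [PySem.List.enumerate_cons, List.filterMap_cons, h, List.map_cons,
        Option.map_none, Option.map_some]
    · exact hih
    · exact congrArg _ hih

-- B's group scan = the group of the pairs list
theorem pvGroup_eq (props : List (List (String × String))) (k : List String) : ∀ (s : Int),
    ((PySem.List.enumerate (props.map pvGameKey) s).filter (fun q => q.2 = some k)).map (fun q => q.1)
      = ((pvPairs props s).filter (fun p => p.1 == k)).map (fun p => p.2) := by
  induction props with
  | nil => intro s; rfl
  | cons r props ih =>
    intro s
    have hih := ih (s+1); simp only [pvPairs] at hih ⊢
    cases h : pvGameKey r with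
    | none =>
      simpa [PySem.List.enumerate_cons, List.filterMap_cons, h] using hih
    | some k' =>
      by_cases hk : k' = k <;>
        simpa [PySem.List.enumerate_cons, List.filterMap_cons, h, hk] using hih

-- B's seen-threading fold = fold of G over pvNews
theorem pvFoldl_seen (G : PySem.Dict Int String → List String → PySem.Dict Int String) :
    ∀ (ks seen : List (Option (List String))) (w : PySem.Dict Int String),
    (ks.foldl (fun st k0 =>
        (match k0 with
         | none => st.1
         | some k => if k0 ∈ st.2 then st.1 else G st.1 k,
         st.2 ++ [k0])) (w, seen)).1
      = (pvNews ks seen).foldl G w := by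
  intro ks
  induction ks with
  | nil => intro seen w; rfl
  | cons k0 ks ih =>
    intro seen w
    cases k0 with
    | none => simpa [pvNews] using ih (seen ++ [none]) w
    | some k =>
      by_cases hk : some k ∈ seen <;>
        simp [pvNews, hk, ih]

theorem pvNews_eq_update (ks : List (Option (List String))) :
    ∀ (S : List (List String)) (seen : List (Option (List String))),
    (∀ x, x ∈ S ↔ some x ∈ seen) →
    PySem.Set.update S (ks.filterMap id) = S ++ pvNews ks seen := by
  induction ks with
  | nil => intro S seen h; simp [pvNews, PySem.Set.update_nil]
  | cons k0 ks ih =>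
    intro S seen h
    cases k0 with
    | none =>
      rw [show List.filterMap id (none :: ks) = List.filterMap id ks from rfl]
      simp only [pvNews]
      exact ih S (seen ++ [none]) (by intro x; simp [h])
    | some k =>
      rw [show List.filterMap id (some k :: ks) = k :: List.filterMap id ks from rfl,
        PySem.Set.update_cons]
      simp only [pvNews]
      by_cases hk : some k ∈ seen
      · rw [PySem.Set.add_of_mem ((h k).mpr hk), if_pos hk]
        refine ih S (seen ++ [some k]) ?_
        intro x
        simp only [List.mem_append, List.mem_singleton, h, Option.some.injEq]
        exact ⟨Or.inl, by rintro (hx | rfl); exacts [hx, hk]⟩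
      · rw [PySem.Set.add_of_not_mem (fun hx => hk ((h k).mp hx)), if_neg hk]
        rw [ih (S ++ [k]) (seen ++ [some k])
          (by intro x; simp [List.mem_append, h])]
        simp

-- the common shape both programs reduce to: fold pvBody over the first-occurrence keys
def pvMid (props : List (List (String × String))) : List (Int × String) :=
  ((pvNews (props.map pvGameKey) []).foldl (fun w k =>
      pvBody props w k (((pvPairs props 0).filter (fun p => p.1 == k)).map (fun p => p.2)))
    PySem.Dict.empty).items

set_option maxHeartbeats 1000000 in
theorem pvA_eq_mid (props : List (List (String × String))) :
    detect_correlated_props props = pvMid props := by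
  simp only [detect_correlated_props]
  rw [pvGmap_eq props 0]
  have hnd : ((pvPairs props 0).foldl
      (fun d q => d.modify q.1 [] (fun l => l ++ [q.2]))
      (PySem.Dict.empty : PySem.Dict (List String) (List Int))).keys.Nodup := by
    exact PySem.Dict.nodup_keys_foldl_modify_key _ _ _ _ _ (by simp [PySem.Dict.keys_empty])
  rw [PySem.Dict.items_eq_map_keys _ hnd []]
  rw [PySem.Dict.keys_foldl_modify_key]
  simp only [PySem.Dict.keys_empty, PySem.Dict.getD_foldl_modify_append,
    PySem.Dict.getD_empty, List.nil_append]
  rw [pvPairs_fst props 0]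
  rw [pvNews_eq_update _ [] [] (by intro x; simp)]
  rw [List.nil_append, List.foldl_map]
  unfold pvMid
  congr 1
  refine PySem.List.foldl_congr_mem _ _ _ _ ?_
  intro w k _
  simp only [pvBody, pvName_lookup]

set_option maxHeartbeats 1000000 in
theorem pvB_eq_mid (props : List (List (String × String))) :
    detect_correlated_props_alt props = pvMid props := by
  simp only [detect_correlated_props_alt]
  have hseen := pvFoldl_seen (fun w k =>
      (let group := ((PySem.List.enumerate (props.map pvGameKey)).filter
          (fun q => q.2 = some k)).map (fun q => q.1)
       if group.length ≥ 2 then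
         let teams := PySem.Str.join " vs " k
         group.foldl (fun w i =>
           let others := PySem.Str.join ", " ((group.filter (fun j => j ≠ i)).map
             (fun j => (PySem.List.pyGet? (props.map pvName) j).getD "?"))
           w.insert i (pvMsg others teams)) w
       else w))
    (props.map pvGameKey) [] PySem.Dict.empty
  refine (congrArg PySem.Dict.items hseen).trans ?_
  unfold pvMid
  congr 1
  refine PySem.List.foldl_congr_mem _ _ _ _ ?_
  intro w k _
  rw [pvGroup_eq props k 0]
  simp only [pvBody]
  by_cases h2 : (((pvPairs props 0).filter (fun p => p.1 == k)).map (fun p => p.2)).length < 2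
  · rw [if_neg (by omega), if_pos h2]
  · rw [if_pos (by omega), if_neg h2]

-- ===== VERDICT (by name: the statement is the Claim_ definition above) =====
theorem detect_correlated_props_spec : Claim_equal_detect_correlated_props := by
  intro props _
  show detect_correlated_props props = detect_correlated_props_alt props
  rw [pvA_eq_mid, pvB_eq_mid]
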